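-- pv_equiv track=rewrite | github.com/ycachy/Codee | Code search/test.py | JudgeCharIndex
-- ===== SOURCE A (Python) =====
-- def JudgeCharIndex(s):
--     i = 0
--     for ch in s:
--         if ch >= 'a' and ch <= 'z':
--             return i
--         elif ch >= 'A' and ch <= 'Z':
--             return i
--         else:
--             i=i+1
-- ===== SOURCE B (Python) =====
-- import re
--
-- def JudgeCharIndex(s):
--     m = re.search('[a-zA-Z]', s)
--     return m.start() if m else None
-- ===== Notes on version B (the rewrite author's own statement) =====
-- stated objective: idiomatic
-- what changed: Replaces the explicit index-counter loop with a single regex search for [a-zA-Z], returning m.start() or None.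
import Mathlib
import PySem

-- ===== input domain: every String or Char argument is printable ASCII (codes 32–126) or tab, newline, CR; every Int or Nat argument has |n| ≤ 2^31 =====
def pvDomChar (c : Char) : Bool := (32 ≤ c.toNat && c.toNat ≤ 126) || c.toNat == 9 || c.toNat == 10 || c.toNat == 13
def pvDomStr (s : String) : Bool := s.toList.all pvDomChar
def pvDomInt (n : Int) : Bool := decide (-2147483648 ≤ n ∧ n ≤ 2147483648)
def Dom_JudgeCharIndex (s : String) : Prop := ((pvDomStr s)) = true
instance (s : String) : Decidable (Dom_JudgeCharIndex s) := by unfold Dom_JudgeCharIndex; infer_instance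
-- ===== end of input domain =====

-- B replaces A's explicit index-counter loop with a single search (regex in Python, findIdx? in Lean); idiomatic, same cost.


-- ===== PORT A =====
-- A's loop: index counter i, two range tests in order, fall through returns None.
def judgeCharIndexGo : List Char → Int → Option Int
  | [], _ => none
  | c :: cs, i =>
    if 'a' ≤ c && c ≤ 'z' then some i
    else if 'A' ≤ c && c ≤ 'Z' then some i
    else judgeCharIndexGo cs (i + 1)

def JudgeCharIndex (s : String) : Option Int := judgeCharIndexGo s.toList 0

-- ===== PORT B =====
-- The regex class [a-zA-Z] as a character predicate; re.search's first-match index = findIdx?.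
def pvIsAsciiLetter (c : Char) : Bool := ('a' ≤ c && c ≤ 'z') || ('A' ≤ c && c ≤ 'Z')

def JudgeCharIndex_alt (s : String) : Option Int :=
  (s.toList.findIdx? pvIsAsciiLetter).map (fun n => (n : Int))

-- ===== PRECONDITION & SPEC =====
def Spec_JudgeCharIndex (s : String) (out : Option Int) : Prop := out = JudgeCharIndex_alt s
instance (s : String) (out : Option Int) : Decidable (Spec_JudgeCharIndex s out) := by unfold Spec_JudgeCharIndex; infer_instance

-- ===== CLAIM (what is proved, stated in full; the proofs are below) =====
def Claim_equal_JudgeCharIndex : Prop := ∀ (s : String), Dom_JudgeCharIndex s → Spec_JudgeCharIndex s (JudgeCharIndex s)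

-- ===== LEMMAS AND PROOFS =====
theorem judgeCharIndexGo_eq (l : List Char) (i : Int) :
    judgeCharIndexGo l i = (l.findIdx? pvIsAsciiLetter).map (fun n => i + (n : Int)) := by
  induction l generalizing i with
  | nil => simp [judgeCharIndexGo]
  | cons c cs ih =>
    by_cases h : pvIsAsciiLetter c = true
    · rcases Bool.or_eq_true_iff.mp h with hl | hu
      · simp [judgeCharIndexGo, hl, List.findIdx?_cons, h]
      · simp only [judgeCharIndexGo, List.findIdx?_cons, h]
        by_cases hl : ('a' ≤ c && c ≤ 'z') = true <;> simp [hl, hu]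
    · have h' := Bool.or_eq_false_iff.mp (Bool.eq_false_iff.mpr h)
      have hl := h'.1
      have hu := h'.2
      simp only [judgeCharIndexGo, List.findIdx?_cons, h, hl, hu]
      rw [ih]
      cases hfi : cs.findIdx? pvIsAsciiLetter with
      | none => simp
      | some n => simp; ring

-- ===== VERDICT (by name: the statement is the Claim_ definition above) =====
theorem JudgeCharIndex_spec : Claim_equal_JudgeCharIndex := by
  intro s _
  show JudgeCharIndex s = JudgeCharIndex_alt s
  simp [JudgeCharIndex, JudgeCharIndex_alt, judgeCharIndexGo_eq]
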